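-- pv_equiv track=rewrite | github.com/DevDanielNAM/Coding-Test | 프로그래머스/1/42840. 모의고사/모의고사.py | solution
-- ===== SOURCE A (Python) =====
-- def solution(answers):
--     answer = []
--
--     p1 = [1, 2, 3, 4, 5]
--     p2 = [2, 1, 2, 3, 2, 4, 2, 5]
--     p3 = [3, 3, 1, 1, 2, 2, 4, 4, 5, 5]
--
--     correct_cnt = {1:0, 2:0, 3:0}
--
--     for i in range(len(answers)):
--         if answers[i] == p1[0]:
--             correct_cnt[1] += 1
--         if answers[i] == p2[0]:
--             correct_cnt[2] += 1
--         if answers[i] == p3[0]: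
--             correct_cnt[3] += 1
--
--         p1.append(p1.pop(0))
--         p2.append(p2.pop(0))
--         p3.append(p3.pop(0))
--
--     answer = [k for k,v in correct_cnt.items() if max(correct_cnt.values()) == v]
--
--     return answer
-- ===== SOURCE B (Python) =====
-- def solution(answers):
--     patterns = [[1, 2, 3, 4, 5],
--                 [2, 1, 2, 3, 2, 4, 2, 5],
--                 [3, 3, 1, 1, 2, 2, 4, 4, 5, 5]]
--     counts = [sum(1 for i, a in enumerate(answers) if a == p[i % len(p)])
--               for p in patterns]
--     m = max(counts)
--     return [k + 1 for k, c in enumerate(counts) if c == m]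
-- ===== Notes on version B (the rewrite author's own statement) =====
-- stated objective: simpler
-- what changed: Replaces A's single interleaved loop that rotates three mutable pattern lists (pop(0)/append each step) with three independent per-pattern passes using modular indexing (p[i % len(p)]), then assembles the result from the counts list by max and enumerate.
import Mathlib
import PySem

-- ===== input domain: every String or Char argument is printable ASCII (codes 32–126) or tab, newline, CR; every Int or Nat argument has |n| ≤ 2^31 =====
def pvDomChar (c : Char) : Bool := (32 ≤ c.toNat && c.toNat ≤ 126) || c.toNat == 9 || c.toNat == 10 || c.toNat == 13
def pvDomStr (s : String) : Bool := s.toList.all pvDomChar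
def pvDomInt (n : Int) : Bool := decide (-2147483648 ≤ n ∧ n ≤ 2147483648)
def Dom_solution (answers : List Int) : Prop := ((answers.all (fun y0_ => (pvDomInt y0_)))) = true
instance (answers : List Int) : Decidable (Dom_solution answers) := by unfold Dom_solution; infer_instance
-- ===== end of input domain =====

-- B replaces A's single interleaved loop that rotates three mutable pattern lists
-- (pop(0)/append each step) with three independent per-pattern passes using modular
-- indexing; objective: simpler.

-- ===== PORT A =====
-- p.append(p.pop(0)) on a nonempty list (the pattern lists are never empty; [] case unreachable)
def rotA (l : List Int) : List Int :=
  match l with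
  | [] => []
  | x :: xs => xs ++ [x]

-- the loop 'for i in range(len(answers)): …' reading answers[i] in order, carrying the
-- three rotating pattern lists and the three counters of the fixed-key dict {1:_, 2:_, 3:_}
def loopA : List Int → List Int → List Int → List Int → Int × Int × Int → Int × Int × Int
  | [], _, _, _, c => c
  | a :: rest, p1, p2, p3, (c1, c2, c3) =>
      loopA rest (rotA p1) (rotA p2) (rotA p3)
        ((if a = p1.headI then c1 + 1 else c1),
         (if a = p2.headI then c2 + 1 else c2),
         (if a = p3.headI then c3 + 1 else c3))

def solution (answers : List Int) : List Int :=
  let c := loopA answers [1,2,3,4,5] [2,1,2,3,2,4,2,5] [3,3,1,1,2,2,4,4,5,5] (0, 0, 0)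
  -- max(correct_cnt.values()) over the values [c1, c2, c3], left to right
  let m := max (max c.1 c.2.1) c.2.2
  -- [k for k,v in correct_cnt.items() if max == v], items in key order 1, 2, 3
  (if m = c.1 then [1] else []) ++ (if m = c.2.1 then [2] else []) ++
    (if m = c.2.2 then [3] else [])

-- ===== PORT B =====
-- sum(1 for i, a in enumerate(answers) if a == p[i % len(p)])
def countB (pat : List Int) : List Int → Nat → Int
  | [], _ => 0
  | a :: rest, i => (if a = pat.getD (i % pat.length) 0 then 1 else 0) + countB pat rest (i + 1)

def solution_alt (answers : List Int) : List Int :=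
  let counts := [countB [1,2,3,4,5] answers 0,
                 countB [2,1,2,3,2,4,2,5] answers 0,
                 countB [3,3,1,1,2,2,4,4,5,5] answers 0]
  let m := (PySem.List.max? counts (fun x => x)).getD 0   -- max(counts); counts ≠ [], default unused
  ((PySem.List.enumerate counts 0).filter (fun kc => kc.2 == m)).map (fun kc => kc.1 + 1)

-- ===== PRECONDITION & SPEC =====
def Spec_solution (answers : List Int) (out : List Int) : Prop := out = solution_alt answers
instance (answers : List Int) (out : List Int) : Decidable (Spec_solution answers out) := by unfold Spec_solution; infer_instance

-- ===== CLAIM (what is proved, stated in full; the proofs are below) =====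
def Claim_equal_solution : Prop := ∀ (answers : List Int), Dom_solution answers → Spec_solution answers (solution answers)

-- ===== LEMMAS AND PROOFS =====

lemma rotA_rotate (l : List Int) (hl : l ≠ []) (k : Nat) :
    rotA (l.rotate k) = l.rotate (k + 1) := by
  have h : l.rotate k ≠ [] := by simp [hl]
  cases hrk : l.rotate k with
  | nil => exact absurd hrk h
  | cons x xs =>
      have hr : (l.rotate k).rotate 1 = l.rotate (k + 1) := by rw [List.rotate_rotate]
      rw [← hr, hrk]
      simp [rotA, List.rotate_cons_succ]

lemma headI_rotate (l : List Int) (hl : l ≠ []) (k : Nat) :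
    (l.rotate k).headI = l.getD (k % l.length) 0 := by
  have hlen : 0 < l.length := List.length_pos_of_ne_nil hl
  have h0 : 0 < (l.rotate k).length := by simpa using hlen
  have hx : (l.rotate k)[0] = l[(0 + k) % l.length]'(Nat.mod_lt _ hlen) :=
    List.getElem_rotate l k 0 h0
  cases hrk : l.rotate k with
  | nil => rw [hrk] at h0; simp at h0
  | cons x xs =>
      simp only [hrk, List.getElem_cons_zero] at hx
      simp only [List.headI_cons]
      rw [hx]
      simp [List.getD_eq_getElem?_getD, List.getElem?_eq_getElem (Nat.mod_lt _ hlen)]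

-- loop invariant: after k rotations the interleaved loop adds exactly the three
-- modular-index counts of B, each counter independent of the other two
lemma loopA_eq (P1 P2 P3 : List Int) (h1 : P1 ≠ []) (h2 : P2 ≠ []) (h3 : P3 ≠ []) :
    ∀ (answers : List Int) (k : Nat) (c1 c2 c3 : Int),
      loopA answers (P1.rotate k) (P2.rotate k) (P3.rotate k) (c1, c2, c3)
        = (c1 + countB P1 answers k, c2 + countB P2 answers k, c3 + countB P3 answers k) := by
  intro answers
  induction answers with
  | nil => intro k c1 c2 c3; simp [loopA, countB]
  | cons a rest ih =>
      intro k c1 c2 c3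
      rw [loopA, rotA_rotate P1 h1, rotA_rotate P2 h2, rotA_rotate P3 h3,
          headI_rotate P1 h1, headI_rotate P2 h2, headI_rotate P3 h3, ih]
      simp only [countB, Prod.mk.injEq]
      refine ⟨?_, ?_, ?_⟩ <;> split_ifs <;> ring

-- the two result-assembly tails agree for any three counts
lemma tail_eq (a b c : Int) :
    (if max (max a b) c = a then [1] else []) ++ (if max (max a b) c = b then [2] else [])
      ++ (if max (max a b) c = c then ([3] : List Int) else [])
    = ((PySem.List.enumerate [a,b,c] 0).filter
        (fun kc => kc.2 == (PySem.List.max? [a,b,c] (fun x => x)).getD 0)).map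
        (fun kc => kc.1 + 1) := by
  have hmax : PySem.List.max? [a,b,c] (fun x => x) = some (max (max a b) c) := by
    rw [PySem.List.max?_id_cons]; simp [List.foldl]
  rw [hmax]
  have hM : max (max a b) c = a ∨ max (max a b) c = b ∨ max (max a b) c = c := by
    rcases max_choice (max a b) c with h' | h'
    · rcases max_choice a b with h | h
      · left; rw [h', h]
      · right; left; rw [h', h]
    · right; right; exact h'
  simp only [PySem.List.enumerate_cons, PySem.List.enumerate_nil, Option.getD_some,
    List.filter_cons, List.filter_nil]
  generalize max (max a b) c = M at hM ⊢
  simp only [show (M = a) ↔ (a = M) from eq_comm, show (M = b) ↔ (b = M) from eq_comm,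
      show (M = c) ↔ (c = M) from eq_comm]
  by_cases ha : a = M <;> by_cases hb : b = M <;> by_cases hc : c = M <;>
    simp [ha, hb, hc]

-- ===== VERDICT (by name: the statement is the Claim_ definition above) =====
theorem solution_spec : Claim_equal_solution := by
  intro answers _
  unfold Spec_solution solution solution_alt
  have hl := loopA_eq [1,2,3,4,5] [2,1,2,3,2,4,2,5] [3,3,1,1,2,2,4,4,5,5]
      (by simp) (by simp) (by simp) answers 0 0 0 0
  simp only [List.rotate_zero] at hl
  rw [hl]
  simpa using tail_eq (countB [1,2,3,4,5] answers 0) (countB [2,1,2,3,2,4,2,5] answers 0)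
    (countB [3,3,1,1,2,2,4,4,5,5] answers 0)
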